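-- pv_equiv track=rewrite | github.com/John3210of/AnyPrac | 1eetcode/36.py | is_vaild_list
-- ===== SOURCE A (Python) =====
-- def is_vaild_list(lst):
--     seen = set()
--     for num in lst:
--         if num != '.':
--             if num in seen:
--                 return False
--             seen.add(num)
--     return True
-- ===== SOURCE B (Python) =====
-- def is_vaild_list(lst):
--     vals = sorted(x for x in lst if x != '.')
--     for a, b in zip(vals, vals[1:]):
--         if a == b:
--             return False
--     return True
-- ===== Notes on version B (the rewrite author's own statement) =====
-- stated objective: alternative
-- what changed: Replaces A's hash-set membership scan with early exit by a sort-based algorithm: sort the non-dot elements and report a duplicate iff some two adjacent sorted elements are equal.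
import Mathlib
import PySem

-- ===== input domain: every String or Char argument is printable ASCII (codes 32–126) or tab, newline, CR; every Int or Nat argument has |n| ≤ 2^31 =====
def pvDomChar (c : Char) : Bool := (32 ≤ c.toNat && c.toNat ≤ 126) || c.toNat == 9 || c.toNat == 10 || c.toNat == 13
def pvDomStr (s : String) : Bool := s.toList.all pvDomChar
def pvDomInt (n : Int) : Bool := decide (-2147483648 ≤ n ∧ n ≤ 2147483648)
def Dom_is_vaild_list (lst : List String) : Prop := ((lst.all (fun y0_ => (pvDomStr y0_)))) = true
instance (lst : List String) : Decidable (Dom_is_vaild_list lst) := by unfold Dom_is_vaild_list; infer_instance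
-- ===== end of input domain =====

-- B replaces A's seen-set membership scan by a sort-based algorithm: sort the
-- non-dot elements and look for two equal adjacent elements (objective: alternative).


-- ===== PORT A =====
-- the 'for num in lst' loop, with 'seen' as the threaded state; 'return False' is the false branch
def isVaildLoop (seen : PySem.Set String) : List String → Bool
  | [] => true
  | num :: rest =>
    if num ≠ "." then
      if seen.contains num then false
      else isVaildLoop (seen.add num) rest
    else isVaildLoop seen rest

def is_vaild_list (lst : List String) : Bool := isVaildLoop PySem.Set.empty lst

-- ===== PORT B =====
-- the 'for a, b in zip(vals, vals[1:])' loop: walk adjacent pairs, 'return False' on equality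
def noAdjDup : List String → Bool
  | a :: b :: t => if a == b then false else noAdjDup (b :: t)
  | _ => true

def is_vaild_list_alt (lst : List String) : Bool :=
  noAdjDup (PySem.List.sorted (lst.filter (fun x => x ≠ ".")) (fun x => x) false)

-- ===== PRECONDITION & SPEC =====
def Spec_is_vaild_list (lst : List String) (out : Bool) : Prop := out = is_vaild_list_alt lst
instance (lst : List String) (out : Bool) : Decidable (Spec_is_vaild_list lst out) := by unfold Spec_is_vaild_list; infer_instance

-- ===== CLAIM (what is proved, stated in full; the proofs are below) =====
def Claim_equal_is_vaild_list : Prop := ∀ (lst : List String), Dom_is_vaild_list lst → Spec_is_vaild_list lst (is_vaild_list lst)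

-- ===== LEMMAS AND PROOFS =====
-- A's loop decides: the filtered list is duplicate-free and disjoint from the initial seen-set.
theorem isVaildLoop_eq (xs : List String) : ∀ (seen : PySem.Set String),
    isVaildLoop seen xs =
      decide ((xs.filter (fun x => x ≠ ".")).Nodup ∧ ∀ x ∈ xs.filter (fun x => x ≠ "."), x ∉ seen) := by
  induction xs with
  | nil => intro seen; simp [isVaildLoop]
  | cons y ys ih =>
    intro seen
    by_cases hy : y = "."
    · simp [isVaildLoop, hy, ih]
    · by_cases hc : y ∈ seen
      · have hcc : seen.contains y = true := by simpa [PySem.Set.contains] using hc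
        simp [isVaildLoop, hy, hc]
      · have hcc : seen.contains y = false := by
          simp [PySem.Set.contains]; exact hc
        simp only [isVaildLoop, hy, ne_eq, not_false_iff, if_true, hcc,
          Bool.false_eq_true, if_false, ih]
        rw [decide_eq_decide]
        simp only [List.filter_cons, hy, decide_true, List.nodup_cons, List.mem_cons,
          PySem.Set.mem_add, not_false_eq_true, if_true]
        constructor
        · rintro ⟨hn, hmem⟩
          refine ⟨⟨fun hmemy => by have := hmem y hmemy; tauto, hn⟩, ?_⟩
          rintro x (rfl | hx)
          · exact hc
          · have := hmem x hx; tauto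
        · rintro ⟨⟨hny, hn⟩, hmem⟩
          refine ⟨hn, fun x hx => ?_⟩
          have h1 : x ∉ seen := hmem x (Or.inr hx)
          have h2 : x ≠ y := by rintro rfl; exact hny hx
          tauto

-- on a ≤-sorted list, 'no equal adjacent pair' decides Nodup
theorem noAdjDup_eq_nodup : ∀ (ys : List String), ys.Pairwise (· ≤ ·) →
    noAdjDup ys = decide ys.Nodup
  | [] => by intro _; simp [noAdjDup]
  | [a] => by intro _; simp [noAdjDup]
  | a :: b :: t => by
    intro hp
    have hab : a ≤ b := (List.pairwise_cons.mp hp).1 b (by simp)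
    have hrest := (List.pairwise_cons.mp hp).2
    by_cases h : a = b
    · simp [noAdjDup, h]
    · have : noAdjDup (a :: b :: t) = noAdjDup (b :: t) := by simp [noAdjDup, h]
      rw [this, noAdjDup_eq_nodup (b :: t) hrest, decide_eq_decide]
      constructor
      · intro hn
        refine List.nodup_cons.mpr ⟨?_, hn⟩
        intro hmem
        rcases List.mem_cons.mp hmem with heq | hx
        · exact h heq
        · -- a ≤ b and b ≤ a (since a ∈ t, b ≤ a by sortedness) force a = b
          have hba : b ≤ a := (List.pairwise_cons.mp hrest).1 a hx
          exact h (le_antisymm hab hba)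
      · intro hn; exact hn.of_cons

-- ===== VERDICT (by name: the statement is the Claim_ definition above) =====
theorem is_vaild_list_spec : Claim_equal_is_vaild_list := by
  intro lst _
  unfold Spec_is_vaild_list is_vaild_list is_vaild_list_alt
  rw [isVaildLoop_eq, noAdjDup_eq_nodup _ (by simpa using PySem.List.sorted_pairwise (lst.filter (fun x => x ≠ ".")) (fun x => x)),
    decide_eq_decide]
  rw [(PySem.List.sorted_perm ..).nodup_iff]
  simp [PySem.Set.empty]
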